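-- pv_equiv track=rewrite | github.com/whsqkaak/CodingTrainingStudy | fs/target_number.py | solution_rec
-- ===== SOURCE A (Python) =====
-- def solution_rec(numbers, sums):
--     if numbers == []:
--         return sums
--
--     n = numbers[0]
--     if sums == []:
--         return solution_rec(numbers[1:], [n, -n])
--
--     tmps = [[sums[0]+n, sums[0]-n], [sums[1]+n, sums[1]-n]]
--     return solution_rec(numbers[1:], tmps[0]) + solution_rec(numbers[1:], tmps[1])
-- ===== SOURCE B (Python) =====
-- def solution_rec(numbers, sums):
--     if not numbers:
--         return sums
--     if sums:
--         result = sums[:2]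
--         todo = numbers
--     else:
--         n = numbers[0]
--         result = [n, -n]
--         todo = numbers[1:]
--     for n in todo:
--         result = [x for s in result for x in (s + n, s - n)]
--     return result
-- ===== Notes on version B (the rewrite author's own statement) =====
-- stated objective: alternative
-- what changed: Replaces the binary accumulator recursion (which concatenates two recursive results at every level) by a single iterative doubling pass that rebuilds one result list per number.
import Mathlib
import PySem

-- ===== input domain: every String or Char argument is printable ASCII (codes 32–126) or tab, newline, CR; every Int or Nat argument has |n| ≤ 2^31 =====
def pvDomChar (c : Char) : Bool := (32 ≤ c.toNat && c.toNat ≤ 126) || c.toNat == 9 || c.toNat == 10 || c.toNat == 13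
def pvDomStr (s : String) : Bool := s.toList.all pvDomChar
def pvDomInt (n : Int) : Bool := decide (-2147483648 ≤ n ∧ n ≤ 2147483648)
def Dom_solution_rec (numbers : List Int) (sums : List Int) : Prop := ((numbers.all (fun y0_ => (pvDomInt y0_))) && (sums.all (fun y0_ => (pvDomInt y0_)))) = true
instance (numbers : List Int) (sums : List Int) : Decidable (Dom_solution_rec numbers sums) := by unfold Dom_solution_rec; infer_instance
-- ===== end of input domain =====

-- B replaces A's binary accumulator recursion by a single iterative doubling pass over one result list (alternative decomposition; no speed claim).


-- ===== PORT A =====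
-- Literal transliteration of A; the 'n :: rest, [_]' case is Python's IndexError
-- at sums[1] (excluded by Pre_), where the port returns [].
def solution_rec : List Int → List Int → List Int
  | [], sums => sums
  | n :: rest, [] => solution_rec rest [n, -n]
  | n :: rest, s0 :: s1 :: _ =>
      solution_rec rest [s0 + n, s0 - n] ++ solution_rec rest [s1 + n, s1 - n]
  | _ :: _, [_] => []

-- ===== PORT B =====
-- one doubling step: [x for s in result for x in (s + n, s - n)]
def altStep (result : List Int) (n : Int) : List Int :=
  result.flatMap (fun s => [s + n, s - n])

def solution_rec_alt (numbers : List Int) (sums : List Int) : List Int :=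
  if numbers = [] then sums
  else
    let seed : List Int × List Int :=
      if sums = [] then ([numbers.headI, -numbers.headI], numbers.tail)
      else (PySem.List.slice sums none (some 2), numbers)
    seed.2.foldl altStep seed.1

-- ===== PRECONDITION & SPEC =====
-- Pre_ excludes exactly the inputs where A raises IndexError (sums of length 1 with numbers nonempty).
def Pre_solution_rec (numbers : List Int) (sums : List Int) : Prop :=
  numbers = [] ∨ sums.length ≠ 1
instance (numbers : List Int) (sums : List Int) : Decidable (Pre_solution_rec numbers sums) := by unfold Pre_solution_rec; infer_instance
def pvWitness_solution_rec : List Int × List Int := ([1, 2], [])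

def Spec_solution_rec (numbers : List Int) (sums : List Int) (out : List Int) : Prop := out = solution_rec_alt numbers sums
instance (numbers : List Int) (sums : List Int) (out : List Int) : Decidable (Spec_solution_rec numbers sums out) := by unfold Spec_solution_rec; infer_instance

-- ===== CLAIM (what is proved, stated in full; the proofs are below) =====
def Claim_equal_solution_rec : Prop := ∀ (numbers : List Int) (sums : List Int), Dom_solution_rec numbers sums → Pre_solution_rec numbers sums → Spec_solution_rec numbers sums (solution_rec numbers sums)

-- ===== LEMMAS AND PROOFS =====

theorem foldl_altStep_append (rest : List Int) (a b : List Int) :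
    rest.foldl altStep (a ++ b) = rest.foldl altStep a ++ rest.foldl altStep b := by
  induction rest generalizing a b with
  | nil => simp
  | cons n rest ih =>
      simp only [List.foldl_cons]
      rw [show altStep (a ++ b) n = altStep a n ++ altStep b n by
            simp [altStep, List.flatMap_append]]
      exact ih _ _

theorem solution_rec_pair (rest : List Int) (s0 s1 : Int) :
    solution_rec rest [s0, s1] = rest.foldl altStep [s0, s1] := by
  induction rest generalizing s0 s1 with
  | nil => rfl
  | cons n rest ih =>
      simp only [solution_rec, List.foldl_cons]
      rw [ih, ih]
      rw [show altStep [s0, s1] n = [s0 + n, s0 - n] ++ [s1 + n, s1 - n] by rfl]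
      exact (foldl_altStep_append rest _ _).symm

-- ===== VERDICT (by name: the statement is the Claim_ definition above) =====
theorem solution_rec_spec : Claim_equal_solution_rec := by
  intro numbers sums _ hpre
  unfold Spec_solution_rec
  cases numbers with
  | nil => simp [solution_rec, solution_rec_alt]
  | cons n rest =>
      cases sums with
      | nil =>
          simp only [solution_rec, solution_rec_alt, if_neg (List.cons_ne_nil n rest)]
          exact solution_rec_pair rest n (-n)
      | cons s0 t =>
          cases t with
          | nil =>
              rcases hpre with h | h
              · exact absurd h (List.cons_ne_nil n rest)
              · simp at h
          | cons s1 t' =>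
              simp only [solution_rec, solution_rec_alt,
                if_neg (List.cons_ne_nil n rest), if_neg (List.cons_ne_nil s0 (s1 :: t'))]
              rw [show PySem.List.slice (s0 :: s1 :: t') none (some 2) = [s0, s1] by
                    simpa using PySem.List.slice_to_natCast (s0 :: s1 :: t') 2]
              rw [solution_rec_pair, solution_rec_pair,
                  ← foldl_altStep_append rest [s0 + n, s0 - n] [s1 + n, s1 - n]]
              rfl
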